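-- pv_equiv track=rewrite | github.com/DmitryBabuev/codic | maxprofit_iterable.py | find_next_biggest
-- ===== SOURCE A (Python) =====
-- def find_next_biggest(sub_prices: list, start_index):
--     value = 0
--     index = 0
--     for i in range(start_index, len(sub_prices)):
--         if sub_prices[i] > value:
--             value = sub_prices[i]
--             index = i
--     return value, index
-- ===== SOURCE B (Python) =====
-- def find_next_biggest(sub_prices: list, start_index):
--     value = max([0] + sub_prices[start_index:])
--     if value > 0:
--         index = sub_prices.index(value, start_index)
--     else:
--         index = 0
--     return value, index
-- ===== Notes on version B (the rewrite author's own statement) =====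
-- stated objective: alternative
-- what changed: Replaces A's single fused running-max/argmax loop by a two-pass decomposition: max over [0]+suffix, then list.index to locate it.
-- intended difference: For negative start_index on a list containing a positive element, A's negative-index wraparound rescans the whole list and can return a negative index (e.g. (1,-1) on ([1],-1)); B returns the maximum of the suffix with its nonnegative position ((1,0) there), the intended reading of 'from start_index'. — e.g. on find_next_biggest([1], -1): A returns (1, -1), B returns (1, 0)
import Mathlib
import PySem

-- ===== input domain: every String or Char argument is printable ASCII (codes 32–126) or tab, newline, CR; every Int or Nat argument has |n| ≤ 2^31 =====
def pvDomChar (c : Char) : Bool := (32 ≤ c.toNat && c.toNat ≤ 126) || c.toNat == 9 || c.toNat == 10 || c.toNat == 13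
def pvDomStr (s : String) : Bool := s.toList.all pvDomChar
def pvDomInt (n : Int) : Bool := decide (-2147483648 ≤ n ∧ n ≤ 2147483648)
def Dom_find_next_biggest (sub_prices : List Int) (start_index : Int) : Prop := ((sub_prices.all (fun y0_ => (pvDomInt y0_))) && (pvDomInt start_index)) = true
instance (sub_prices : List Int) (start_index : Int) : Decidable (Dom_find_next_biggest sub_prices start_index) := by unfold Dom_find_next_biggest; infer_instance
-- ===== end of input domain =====

-- B replaces A's fused argmax scan by a two-pass decomposition: max over the suffix, then list.index
-- to locate it ('alternative' objective, same cost); on negative start_index B reports the intended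
-- nonnegative index/suffix maximum where A's negative-index wraparound rescans the whole list (see D_ below).

-- ===== PORT A =====
-- the for-loop of A: walks the index list, fetching sub_prices[i] Python-style (none = IndexError)
def fngLoopA (sub_prices : List Int) : List Int → Int × Int → Option (Int × Int)
  | [], st => some st
  | i :: rest, st =>
    match PySem.List.pyGet? sub_prices i with
    | none => none
    | some x => fngLoopA sub_prices rest (if x > st.1 then (x, i) else st)

def find_next_biggest (sub_prices : List Int) (start_index : Int) : Int × Int :=
  (fngLoopA sub_prices (PySem.List.pyRange start_index (PySem.List.len sub_prices) 1) (0, 0)).getD (0, 0)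

-- ===== PORT B =====
-- Python's list.index(v, start): normalise a negative start against the length (clamped at 0),
-- then return the first position of v at or after it; none = ValueError. Hand-ported (exact).
def pyIdxStart (xs : List Int) (start : Int) : Nat :=
  if start < 0 then ((xs.length : Int) + start).toNat else start.toNat
def pyIndexFrom (xs : List Int) (v : Int) (start : Int) : Option Int :=
  (PySem.List.index? (xs.drop (pyIdxStart xs start)) v).map
    (fun (k : Nat) => (pyIdxStart xs start : Int) + (k : Int))

def find_next_biggest_alt (sub_prices : List Int) (start_index : Int) : Int × Int :=
  match PySem.List.max? ((0 : Int) :: PySem.List.slice sub_prices (some start_index) none) (fun y => y) with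
  | none => (0, 0)        -- unreachable: the list is nonempty
  | some value =>
    if value > 0 then
      match pyIndexFrom sub_prices value start_index with
      | some index => (value, index)
      | none => (0, 0)    -- unreachable: value > 0 was found in the suffix
    else (value, 0)

-- ===== PRECONDITION & SPEC =====
-- Pre_ excludes exactly the inputs where A raises IndexError: start_index < -len(sub_prices).
def Pre_find_next_biggest (sub_prices : List Int) (start_index : Int) : Prop :=
  -(sub_prices.length : Int) ≤ start_index
instance (sub_prices : List Int) (start_index : Int) : Decidable (Pre_find_next_biggest sub_prices start_index) := by unfold Pre_find_next_biggest; infer_instance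

def pvWitness_find_next_biggest : List Int × Int := ([3, 1, 4, 1, 5], 1)

-- For a negative start_index on a list with a positive element, A's negative-index wraparound rescans
-- the whole list and can return a negative index (e.g. (1, -1) on ([1], -1)); B returns the maximum of
-- the suffix with its nonnegative position ((1, 0) there), which is the intended reading of 'from start_index'.
def D_find_next_biggest (sub_prices : List Int) (start_index : Int) : Prop :=
  start_index < 0 ∧ ∃ x ∈ sub_prices, 0 < x
instance (sub_prices : List Int) (start_index : Int) : Decidable (D_find_next_biggest sub_prices start_index) := by unfold D_find_next_biggest; infer_instance

def Spec_find_next_biggest (sub_prices : List Int) (start_index : Int) (out : Int × Int) : Prop := ¬ D_find_next_biggest sub_prices start_index → out = find_next_biggest_alt sub_prices start_index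
instance (sub_prices : List Int) (start_index : Int) (out : Int × Int) : Decidable (Spec_find_next_biggest sub_prices start_index out) := by unfold Spec_find_next_biggest; infer_instance

def pvDiffWitness_find_next_biggest : List Int × Int := ([1], -1)
def pvDiffWitnessOut_find_next_biggest : (Int × Int) × (Int × Int) := ((1, -1), (1, 0))

-- ===== CLAIM (what is proved, stated in full; the proofs are below) =====
def Claim_unchanged_find_next_biggest : Prop := ∀ (sub_prices : List Int) (start_index : Int), Dom_find_next_biggest sub_prices start_index → Pre_find_next_biggest sub_prices start_index → Spec_find_next_biggest sub_prices start_index (find_next_biggest sub_prices start_index)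
def Claim_changed_find_next_biggest : Prop := Dom_find_next_biggest (pvDiffWitness_find_next_biggest.1) (pvDiffWitness_find_next_biggest.2) ∧ Pre_find_next_biggest (pvDiffWitness_find_next_biggest.1) (pvDiffWitness_find_next_biggest.2) ∧ D_find_next_biggest (pvDiffWitness_find_next_biggest.1) (pvDiffWitness_find_next_biggest.2) ∧ find_next_biggest (pvDiffWitness_find_next_biggest.1) (pvDiffWitness_find_next_biggest.2) = pvDiffWitnessOut_find_next_biggest.1 ∧ find_next_biggest_alt (pvDiffWitness_find_next_biggest.1) (pvDiffWitness_find_next_biggest.2) = pvDiffWitnessOut_find_next_biggest.2 ∧ pvDiffWitnessOut_find_next_biggest.1 ≠ pvDiffWitnessOut_find_next_biggest.2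

-- ===== LEMMAS AND PROOFS =====

-- A's loop rewritten over the suffix itself, carrying the running index
def fngGo : List Int → Int → Int × Int → Int × Int
  | [], _, st => st
  | x :: rest, i, st => fngGo rest (i + 1) (if x > st.1 then (x, i) else st)

lemma fngLoopA_bridge (sub_prices : List Int) (s : Int) (st : Int × Int) (hs : 0 ≤ s) :
    fngLoopA sub_prices (PySem.List.pyRange s (PySem.List.len sub_prices) 1) st
      = some (fngGo (sub_prices.drop s.toNat) s st) := by
  rw [PySem.List.len_eq]
  obtain ⟨k, hk⟩ : ∃ k, k = sub_prices.length - s.toNat := ⟨_, rfl⟩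
  induction k generalizing s st with
  | zero =>
    have hlen : (sub_prices.length : Int) ≤ s := by omega
    rw [PySem.List.pyRange_one_eq_nil hlen, List.drop_eq_nil_of_le (by omega)]
    rfl
  | succ k ih =>
    have hlt : s < (sub_prices.length : Int) := by omega
    have hnat : s.toNat < sub_prices.length := by omega
    rw [PySem.List.pyRange_one_cons hlt, List.drop_eq_getElem_cons hnat]
    have hget : PySem.List.pyGet? sub_prices s = some sub_prices[s.toNat] :=
      PySem.List.pyGet?_eq_some_getElem sub_prices hs (by simpa using hlt)
    rw [fngLoopA, hget]
    simp only [fngGo]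
    have h1 : (s + 1).toNat = s.toNat + 1 := by omega
    rw [← h1]
    exact ih (s + 1) _ (by omega) (by omega)

lemma fngGo_spec (t : List Int) : ∀ (i v idx : Int),
    fngGo t i (v, idx)
      = if t.foldl max v > v then (t.foldl max v, i + (t.idxOf (t.foldl max v) : Int)) else (v, idx) := by
  induction t with
  | nil => intro i v idx; simp [fngGo]
  | cons x rest ih =>
    intro i v idx
    simp only [fngGo, List.foldl_cons]
    by_cases hx : x > v
    · have hmax : max v x = x := by omega
      rw [hmax, if_pos hx, ih (i + 1) x i]
      have hge := (PySem.List.le_foldl_max rest x).1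
      by_cases hM : rest.foldl max x > x
      · have hne : x ≠ rest.foldl max x := by omega
        rw [if_pos hM, if_pos (by omega), List.idxOf_cons_ne _ (by exact_mod_cast hne)]
        simp only [Prod.mk.injEq, Nat.succ_eq_add_one]
        refine ⟨trivial, ?_⟩; push_cast; ring
      · have hMx : rest.foldl max x = x := by omega
        rw [if_neg hM, if_pos (by omega), hMx, List.idxOf_cons_self]
        simp
    · have hmax : max v x = v := by omega
      rw [hmax, if_neg hx, ih (i + 1) v idx]
      by_cases hM : rest.foldl max v > v
      · have hne : x ≠ rest.foldl max v := by omega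
        rw [if_pos hM, if_pos hM, List.idxOf_cons_ne _ (by exact_mod_cast hne)]
        simp only [Prod.mk.injEq, Nat.succ_eq_add_one]
        refine ⟨trivial, ?_⟩; push_cast; ring
      · rw [if_neg hM, if_neg hM]

-- if every fetched element is ≤ 0, A's loop never updates its (0, 0) state
lemma fngLoopA_nonpos (sp : List Int) (hle : ∀ x ∈ sp, x ≤ 0)
    (l : List Int) (hl : ∀ i ∈ l, PySem.Raise.InRange sp.length i) :
    fngLoopA sp l (0, 0) = some (0, 0) := by
  induction l with
  | nil => rfl
  | cons i rest ih =>
    have hin := hl i (List.mem_cons_self ..)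
    cases hget : PySem.List.pyGet? sp i with
    | none => exact absurd hin ((PySem.List.pyGet?_eq_none_iff sp i).mp hget)
    | some x =>
      have hx : x ≤ 0 := hle x (PySem.List.mem_of_pyGet?_eq_some sp hget)
      rw [fngLoopA, hget]
      simp only [if_neg (by omega : ¬ x > (0 : Int))]
      exact ih (fun j hj => hl j (List.mem_cons_of_mem _ hj))

-- first index of a present element, as idxOf (specific glue for B's .index call)
lemma index?_of_mem (t : List Int) (M : Int) (h : M ∈ t) :
    PySem.List.index? t M = some (t.idxOf M) := by
  rw [PySem.List.index?_eq_idxOf?]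
  induction t with
  | nil => simp at h
  | cons x rest ih =>
    by_cases hx : x = M
    · subst hx; simp [List.idxOf?_cons]
    · rcases List.mem_cons.mp h with h1 | h2
      · exact absurd h1.symm hx
      · simp [List.idxOf?_cons, hx, ih h2, Option.map]

-- ===== VERDICT (by name: the statement is the Claim_ definition above) =====
theorem find_next_biggest_spec : Claim_unchanged_find_next_biggest := by
  intro sub_prices start_index _hdom hpre hnd
  unfold Pre_find_next_biggest at hpre
  unfold find_next_biggest find_next_biggest_alt
  by_cases hs : 0 ≤ start_index
  · -- nonnegative start: both compute max/argmax of the suffix t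
    set t := sub_prices.drop start_index.toNat with ht
    rw [fngLoopA_bridge sub_prices start_index (0, 0) hs, fngGo_spec]
    rw [PySem.List.slice_from sub_prices hs, PySem.List.max?_id_cons]
    set M := t.foldl max 0 with hM
    have hM0 : 0 ≤ M := (PySem.List.le_foldl_max t 0).1
    by_cases hpos : M > 0
    · rw [if_pos hpos]
      have hmem : M ∈ t := by
        rcases PySem.List.foldl_max_mem t 0 with h | h
        · omega
        · exact h
      have hstart : pyIdxStart sub_prices start_index = start_index.toNat := by
        unfold pyIdxStart; rw [if_neg (by omega)]
      have hidx : pyIndexFrom sub_prices M start_index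
          = some (start_index + (t.idxOf M : Int)) := by
        unfold pyIndexFrom
        rw [hstart, ← ht, index?_of_mem t M hmem]
        rw [Option.map_some]
        congr 1
        omega
      simp only [Option.getD_some, hidx]
      rw [if_pos hpos]
    · rw [if_neg hpos]
      have hMz : M = 0 := by omega
      simp [hMz]
  · -- negative start, no positive element: both return (0, 0)
    have hneg : start_index < 0 := by omega
    have hle : ∀ x ∈ sub_prices, x ≤ 0 := by
      intro x hx
      by_contra hgt
      exact hnd ⟨hneg, x, hx, by omega⟩
    rw [fngLoopA_nonpos sub_prices hle _ (fun i hi => by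
      have := (PySem.List.mem_pyRange_one).mp (by simpa using hi)
      
      constructor <;> omega)]
    rw [PySem.List.slice_some_none]
    set t := sub_prices.drop (PySem.List.clampIdx sub_prices.length start_index) with ht
    rw [PySem.List.max?_id_cons]
    have hle2 : ∀ x ∈ t, x ≤ 0 := fun x hx => hle x (List.mem_of_mem_drop hx)
    have hM0 : 0 ≤ t.foldl max 0 := (PySem.List.le_foldl_max t 0).1
    have hMz : t.foldl max 0 = 0 := by
      rcases PySem.List.foldl_max_mem t 0 with h | h
      · exact h
      · have := hle2 _ h; omega
    simp [hMz]

theorem find_next_biggest_changed : Claim_changed_find_next_biggest := by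
  unfold Claim_changed_find_next_biggest; decide
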